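-- pv_equiv track=rewrite | github.com/PaulBoutot/RLML | Utils/BuildBlackJackEnvironment.py | buildRewardsArray
-- ===== SOURCE A (Python) =====
-- def buildRewardsArray(states, actions):
--     rewards = []
--     for index in range(len(actions)):
--         rewardArr = [0]*len(states)
--         for act in actions[index]:
--             jumpState = states[act]
--             rewardValue = 0
--             if jumpState[0] < 21:
--                 rewardValue = 5*jumpState[0]
--             elif jumpState[0] == 21:
--                 rewardValue = 10*jumpState[0]
--             elif jumpState[0] > 21:
--                 rewardValue = -20*jumpState[0]
--             rewardArr[act] = rewardValue
--         rewards.append(rewardArr)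
--     return rewards
-- ===== SOURCE B (Python) =====
-- def buildRewardsArray(states, actions):
--     # pass 1: reward table for every act referenced anywhere in actions
--     rewardByAct = {}
--     for row in actions:
--         for act in row:
--             if act not in rewardByAct:
--                 x = states[act][0]
--                 if x < 21:
--                     r = 5*x
--                 elif x == 21:
--                     r = 10*x
--                 else:
--                     r = -20*x
--                 rewardByAct[act] = r
--     # pass 2: scatter the precomputed rewards into dense rows
--     rewards = []
--     for row in actions:
--         rewardArr = [0]*len(states)
--         for act in row:
--             rewardArr[act] = rewardByAct[act]
--         rewards.append(rewardArr)
--     return rewards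
-- ===== Notes on version B (the rewrite author's own statement) =====
-- stated objective: alternative
-- what changed: B splits the nested loop into two passes: a first pass builds a dict mapping each referenced act to its piecewise reward (computed once per distinct act), and a second pass only scatters table lookups into the [0]*len(states) rows, instead of recomputing the reward inline for every occurrence.
import Mathlib
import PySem

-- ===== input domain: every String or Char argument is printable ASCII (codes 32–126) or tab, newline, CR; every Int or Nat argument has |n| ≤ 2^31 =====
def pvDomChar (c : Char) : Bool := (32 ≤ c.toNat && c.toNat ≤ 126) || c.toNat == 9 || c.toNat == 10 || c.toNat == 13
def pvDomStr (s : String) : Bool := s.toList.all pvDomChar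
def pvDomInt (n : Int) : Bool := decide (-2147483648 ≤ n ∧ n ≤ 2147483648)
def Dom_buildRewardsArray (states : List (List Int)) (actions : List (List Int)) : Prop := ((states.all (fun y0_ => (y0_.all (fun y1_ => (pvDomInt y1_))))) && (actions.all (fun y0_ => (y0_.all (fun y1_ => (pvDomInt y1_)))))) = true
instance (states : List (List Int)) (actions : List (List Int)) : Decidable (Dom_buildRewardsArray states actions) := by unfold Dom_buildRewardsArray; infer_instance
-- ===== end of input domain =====

-- B replaces A's inline reward recomputation in the nested loop by two passes: a dict of
-- per-act rewards built first, then a scatter of table lookups into the dense rows (alternative decomposition, same cost).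

-- ===== PORT A =====
def buildRewardsArray (states : List (List Int)) (actions : List (List Int)) : List (List Int) :=
  (PySem.List.pyRange 0 actions.length 1).foldl
    (fun rewards index =>
      let row := PySem.List.pyGetD actions index []
      let rewardArr :=
        row.foldl
          (fun rewardArr act =>
            let jumpState := PySem.List.pyGetD states act []
            let x := PySem.List.pyGetD jumpState 0 0
            let rewardValue : Int :=
              if x < 21 then 5 * x
              else if x = 21 then 10 * x
              else if 21 < x then -20 * x
              else 0
            PySem.List.pySetD rewardArr act rewardValue)
          (List.replicate states.length (0 : Int))
      rewards ++ [rewardArr])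
    []

-- ===== PORT B =====
-- pass 1 of Source B: the reward table over all referenced acts
def pvTable (states : List (List Int)) (actions : List (List Int)) : PySem.Dict Int Int :=
  actions.foldl
    (fun tbl row =>
      row.foldl
        (fun tbl act =>
          if (tbl.contains act) then tbl
          else
            let x := PySem.List.pyGetD (PySem.List.pyGetD states act []) 0 0
            let r : Int := if x < 21 then 5 * x else if x = 21 then 10 * x else -20 * x
            tbl.insert act r)
        tbl)
    PySem.Dict.empty

def buildRewardsArray_alt (states : List (List Int)) (actions : List (List Int)) : List (List Int) :=
  let rewardByAct := pvTable states actions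
  actions.foldl
    (fun rewards row =>
      rewards ++ [row.foldl
        (fun rewardArr act => PySem.List.pySetD rewardArr act (rewardByAct.getD act 0))
        (List.replicate states.length (0 : Int))])
    []

-- ===== PRECONDITION & SPEC =====
-- Pre_ excludes exactly the inputs where the Python raises: an act outside Python's (negative
-- indices allowed) range of states / of the [0]*len(states) row (IndexError), or an act whose
-- state row is empty so jumpState[0] raises IndexError.
def Pre_buildRewardsArray (states : List (List Int)) (actions : List (List Int)) : Prop :=
  ∀ row ∈ actions, ∀ act ∈ row,
    PySem.Raise.InRange states.length act ∧ PySem.List.pyGetD states act [] ≠ []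
instance (states : List (List Int)) (actions : List (List Int)) : Decidable (Pre_buildRewardsArray states actions) := by unfold Pre_buildRewardsArray; infer_instance
def pvWitness_buildRewardsArray : List (List Int) × List (List Int) :=
  ([[5], [21], [25]], [[0, 2], [1, -1], []])

def Spec_buildRewardsArray (states : List (List Int)) (actions : List (List Int)) (out : List (List Int)) : Prop := out = buildRewardsArray_alt states actions
instance (states : List (List Int)) (actions : List (List Int)) (out : List (List Int)) : Decidable (Spec_buildRewardsArray states actions out) := by unfold Spec_buildRewardsArray; infer_instance

-- ===== CLAIM (what is proved, stated in full; the proofs are below) =====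
def Claim_equal_buildRewardsArray : Prop := ∀ (states : List (List Int)) (actions : List (List Int)), Dom_buildRewardsArray states actions → Pre_buildRewardsArray states actions → Spec_buildRewardsArray states actions (buildRewardsArray states actions)

-- ===== LEMMAS AND PROOFS =====

-- the reward A computes for a given act (the trailing `else 0` branch is unreachable)
def pvRewardA (states : List (List Int)) (act : Int) : Int :=
  let x := PySem.List.pyGetD (PySem.List.pyGetD states act []) 0 0
  if x < 21 then 5 * x else if x = 21 then 10 * x else if 21 < x then -20 * x else 0

lemma pvRewardA_eq_B (states : List (List Int)) (act : Int) :
    pvRewardA states act =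
      (let x := PySem.List.pyGetD (PySem.List.pyGetD states act []) 0 0
       if x < 21 then 5 * x else if x = 21 then 10 * x else -20 * x) := by
  simp only [pvRewardA]
  split_ifs with h1 h2 h3 <;> first | rfl | omega

-- abbreviation (proof-side only) for the pass-1 step of B's port
def pvStep (states : List (List Int)) (tbl : PySem.Dict Int Int) (act : Int) : PySem.Dict Int Int :=
  if (tbl.contains act) then tbl
  else
    let x := PySem.List.pyGetD (PySem.List.pyGetD states act []) 0 0
    let r : Int := if x < 21 then 5 * x else if x = 21 then 10 * x else -20 * x
    tbl.insert act r

lemma pvTable_eq_fold (states : List (List Int)) (actions : List (List Int)) :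
    pvTable states actions =
      actions.foldl (fun tbl row => row.foldl (pvStep states) tbl) PySem.Dict.empty := rfl

-- table invariant: every stored value is the reward A would compute for its key
def pvTblInv (states : List (List Int)) (t : PySem.Dict Int Int) : Prop :=
  ∀ k v, t.get? k = some v → v = pvRewardA states k

lemma pvTblInv_step (states : List (List Int)) (t : PySem.Dict Int Int) (act : Int)
    (h : pvTblInv states t) : pvTblInv states (pvStep states t act) := by
  unfold pvStep
  by_cases hc : t.contains act = true
  · rwa [if_pos hc]
  · rw [if_neg hc]
    intro k v hk
    rw [PySem.Dict.get?_insert] at hk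
    by_cases hke : k = act
    · rw [if_pos hke] at hk
      rw [hke, pvRewardA_eq_B]
      exact (Option.some.inj hk).symm
    · rw [if_neg hke] at hk
      exact h k v hk

lemma pvTblInv_rowFold (states : List (List Int)) (row : List Int) (t : PySem.Dict Int Int)
    (h : pvTblInv states t) : pvTblInv states (row.foldl (pvStep states) t) := by
  induction row generalizing t with
  | nil => exact h
  | cons a rest ih => exact ih _ (pvTblInv_step states t a h)

lemma pvContains_step (states : List (List Int)) (t : PySem.Dict Int Int) (act k : Int)
    (h : t.contains k = true) : (pvStep states t act).contains k = true := by
  unfold pvStep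
  by_cases hc : t.contains act = true
  · rwa [if_pos hc]
  · rw [if_neg hc, PySem.Dict.contains_insert, h, Bool.or_true]

lemma pvContains_step_self (states : List (List Int)) (t : PySem.Dict Int Int) (act : Int) :
    (pvStep states t act).contains act = true := by
  unfold pvStep
  by_cases hc : t.contains act = true
  · rwa [if_pos hc]
  · rw [if_neg hc]
    exact PySem.Dict.contains_insert_self t act _

lemma pvContains_rowFold (states : List (List Int)) (row : List Int) (t : PySem.Dict Int Int)
    (k : Int) (h : t.contains k = true) :
    (row.foldl (pvStep states) t).contains k = true := by
  induction row generalizing t with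
  | nil => exact h
  | cons a rest ih => exact ih _ (pvContains_step states t a k h)

lemma pvContains_rowFold_mem (states : List (List Int)) (row : List Int)
    (t : PySem.Dict Int Int) (k : Int) (h : k ∈ row) :
    (row.foldl (pvStep states) t).contains k = true := by
  induction row generalizing t with
  | nil => cases h
  | cons a rest ih =>
    rcases List.mem_cons.mp h with rfl | hrest
    · exact pvContains_rowFold states rest _ k (pvContains_step_self states t k)
    · exact ih _ hrest

lemma pvTable_inv (states : List (List Int)) (actions : List (List Int)) :
    pvTblInv states (pvTable states actions) := by
  rw [pvTable_eq_fold]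
  have main : ∀ (rows : List (List Int)) (t : PySem.Dict Int Int), pvTblInv states t →
      pvTblInv states (rows.foldl (fun tbl row => row.foldl (pvStep states) tbl) t) := by
    intro rows
    induction rows with
    | nil => intro t h; exact h
    | cons r rest ih => intro t h; exact ih _ (pvTblInv_rowFold states r t h)
  refine main actions PySem.Dict.empty ?_
  intro k v hk
  simp [PySem.Dict.get?_empty] at hk

lemma pvTable_contains (states : List (List Int)) (actions : List (List Int))
    (row : List Int) (hrow : row ∈ actions) (k : Int) (hk : k ∈ row) :
    (pvTable states actions).contains k = true := by
  rw [pvTable_eq_fold]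
  have main : ∀ (rows : List (List Int)) (t : PySem.Dict Int Int),
      (row ∈ rows ∨ t.contains k = true) →
      (rows.foldl (fun tbl r => r.foldl (pvStep states) tbl) t).contains k = true := by
    intro rows
    induction rows with
    | nil =>
      intro t h
      rcases h with h | h
      · cases h
      · exact h
    | cons r rest ih =>
      intro t h
      rcases h with h | h
      · rcases List.mem_cons.mp h with rfl | hrest
        · exact ih _ (Or.inr (pvContains_rowFold_mem states row t k hk))
        · exact ih _ (Or.inl hrest)
      · exact ih _ (Or.inr (pvContains_rowFold states r t k h))
  exact main actions PySem.Dict.empty (Or.inl hrow)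

lemma pvTable_getD (states : List (List Int)) (actions : List (List Int))
    (row : List Int) (hrow : row ∈ actions) (k : Int) (hk : k ∈ row) :
    (pvTable states actions).getD k 0 = pvRewardA states k := by
  have hc := pvTable_contains states actions row hrow k hk
  rw [PySem.Dict.contains_eq_isSome_get?] at hc
  rcases Option.isSome_iff_exists.mp hc with ⟨v, hv⟩
  rw [PySem.Dict.getD_eq_get?_getD, hv, Option.getD_some]
  exact pvTable_inv states actions k v hv

-- ===== VERDICT (by name: the statement is the Claim_ definition above) =====
theorem buildRewardsArray_spec : Claim_equal_buildRewardsArray := by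
  intro states actions _ _
  show buildRewardsArray states actions = buildRewardsArray_alt states actions
  have h1 : buildRewardsArray states actions =
      actions.foldl
        (fun rewards row =>
          rewards ++ [row.foldl
            (fun rewardArr act => PySem.List.pySetD rewardArr act (pvRewardA states act))
            (List.replicate states.length (0 : Int))]) [] := by
    unfold buildRewardsArray
    exact PySem.List.foldl_pyRange_zero_pyGetD' actions []
      (fun rewards row =>
        rewards ++ [row.foldl
          (fun rewardArr act => PySem.List.pySetD rewardArr act (pvRewardA states act))
          (List.replicate states.length (0 : Int))]) []
  have h2 : buildRewardsArray_alt states actions =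
      actions.foldl
        (fun rewards row =>
          rewards ++ [row.foldl
            (fun rewardArr act =>
              PySem.List.pySetD rewardArr act ((pvTable states actions).getD act 0))
            (List.replicate states.length (0 : Int))]) [] := rfl
  rw [h1, h2]
  apply PySem.List.foldl_congr_mem
  intro acc row hrow
  refine congrArg (fun z => acc ++ [z]) ?_
  refine PySem.List.foldl_congr_mem row _ _ _ ?_
  intro arr act hact
  rw [pvTable_getD states actions row hrow act hact]
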